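-- pv_equiv track=rewrite | github.com/mutantamoeba/precog | scripts/check_warning_debt.py | extract_validate_docs_warnings
-- ===== SOURCE A (Python) =====
-- def extract_validate_docs_warnings(output: str) -> dict[str, int]:
--     """Extract warning counts from validate_docs.py output."""
--     warnings = {
--         "yaml_float_literals": 0,
--         "master_index_missing": 0,
--         "master_index_deleted": 0,
--         "master_index_planned": 0,
--         "adr_non_sequential": 0,
--     }
--
--     for line in output.split("\n"):
--         if "Float detected in Decimal field" in line:
--             warnings["yaml_float_literals"] += 1
--         elif (
--             "Document exists but not in index" in line
--             or "Document exists but not in MASTER_INDEX" in line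
--         ):
--             warnings["master_index_missing"] += 1
--         elif "Document in index but does not exist" in line or "does not exist" in line:
--             warnings["master_index_deleted"] += 1
--         elif "Planned document" in line or "Status: Planned" in line:
--             warnings["master_index_planned"] += 1
--         elif "ADR gap detected" in line:
--             warnings["adr_non_sequential"] += 1
--
--     return warnings
-- ===== SOURCE B (Python) =====
-- _RULES = [
--     ("yaml_float_literals", ["Float detected in Decimal field"]),
--     ("master_index_missing", ["Document exists but not in index",
--                               "Document exists but not in MASTER_INDEX"]),
--     ("master_index_deleted", ["Document in index but does not exist",
--                               "does not exist"]),
--     ("master_index_planned", ["Planned document", "Status: Planned"]),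
--     ("adr_non_sequential", ["ADR gap detected"]),
-- ]
--
--
-- def _classify(line):
--     """First rule (in priority order) one of whose trigger substrings occurs in line."""
--     for key, subs in _RULES:
--         if any(s in line for s in subs):
--             return key
--     return None
--
--
-- def extract_validate_docs_warnings(output: str) -> dict[str, int]:
--     """Extract warning counts from validate_docs.py output."""
--     lines = output.split("\n")
--     return {key: sum(1 for line in lines if _classify(line) == key)
--             for key, _ in _RULES}
-- ===== Notes on version B (the rewrite author's own statement) =====
-- stated objective: simpler
-- what changed: Replaces the elif chain that mutates a counts dict in one pass with a declarative rule table plus a line classifier, building the result as a per-category count over the classified lines.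
import Mathlib
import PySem

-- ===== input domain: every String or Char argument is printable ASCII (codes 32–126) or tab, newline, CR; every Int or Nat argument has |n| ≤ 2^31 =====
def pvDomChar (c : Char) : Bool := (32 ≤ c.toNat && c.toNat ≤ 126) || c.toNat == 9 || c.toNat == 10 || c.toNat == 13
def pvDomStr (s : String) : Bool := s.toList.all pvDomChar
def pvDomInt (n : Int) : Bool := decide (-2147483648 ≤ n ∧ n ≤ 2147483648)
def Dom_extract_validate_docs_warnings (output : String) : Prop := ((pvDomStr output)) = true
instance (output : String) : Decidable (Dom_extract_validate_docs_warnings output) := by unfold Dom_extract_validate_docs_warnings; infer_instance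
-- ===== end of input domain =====

-- B replaces A's elif chain mutating a counts dict with a rule table + line classifier and per-category counting (simpler, declarative decomposition).


-- ===== PORT A =====
-- loop body of A's for-loop; 'warnings[k] += 1' is modify with default 0 (exact: every key is pre-inserted, so Python's KeyError path is unreachable)
def pvStepA (w : PySem.Dict String Int) (line : String) : PySem.Dict String Int :=
  if PySem.Str.isIn "Float detected in Decimal field" line then
    w.modify "yaml_float_literals" 0 (· + 1)
  else if (PySem.Str.isIn "Document exists but not in index" line
        || PySem.Str.isIn "Document exists but not in MASTER_INDEX" line) then
    w.modify "master_index_missing" 0 (· + 1)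
  else if (PySem.Str.isIn "Document in index but does not exist" line
        || PySem.Str.isIn "does not exist" line) then
    w.modify "master_index_deleted" 0 (· + 1)
  else if (PySem.Str.isIn "Planned document" line
        || PySem.Str.isIn "Status: Planned" line) then
    w.modify "master_index_planned" 0 (· + 1)
  else if PySem.Str.isIn "ADR gap detected" line then
    w.modify "adr_non_sequential" 0 (· + 1)
  else w

def extract_validate_docs_warnings (output : String) : List (String × Int) :=
  let warnings : PySem.Dict String Int :=
    ((((PySem.Dict.empty.insert "yaml_float_literals" 0).insert "master_index_missing" 0).insert
        "master_index_deleted" 0).insert "master_index_planned" 0).insert "adr_non_sequential" 0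
  (((PySem.Str.split? output "\n").getD []).foldl pvStepA warnings).items

-- ===== PORT B =====
def pvRules : List (String × List String) :=
  [("yaml_float_literals", ["Float detected in Decimal field"]),
   ("master_index_missing", ["Document exists but not in index",
                             "Document exists but not in MASTER_INDEX"]),
   ("master_index_deleted", ["Document in index but does not exist",
                             "does not exist"]),
   ("master_index_planned", ["Planned document", "Status: Planned"]),
   ("adr_non_sequential", ["ADR gap detected"])]

def pvClassify (line : String) : Option String :=
  pvRules.findSome? (fun r => if r.2.any (fun s => PySem.Str.isIn s line) then some r.1 else none)

def extract_validate_docs_warnings_alt (output : String) : List (String × Int) :=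
  let lines := (PySem.Str.split? output "\n").getD []  -- sep "\n" ≠ "", so split? is some; getD never takes the default
  pvRules.map (fun r => (r.1, ((lines.countP (fun line => pvClassify line == some r.1)) : Int)))

-- ===== PRECONDITION & SPEC =====
def Spec_extract_validate_docs_warnings (output : String) (out : List (String × Int)) : Prop := out = extract_validate_docs_warnings_alt output
instance (output : String) (out : List (String × Int)) : Decidable (Spec_extract_validate_docs_warnings output out) := by unfold Spec_extract_validate_docs_warnings; infer_instance

-- ===== CLAIM (what is proved, stated in full; the proofs are below) =====
def Claim_equal_extract_validate_docs_warnings : Prop := ∀ (output : String), Dom_extract_validate_docs_warnings output → Spec_extract_validate_docs_warnings output (extract_validate_docs_warnings output)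

-- ===== LEMMAS AND PROOFS =====

def pvKeys5 : List String :=
  ["yaml_float_literals","master_index_missing","master_index_deleted",
   "master_index_planned","adr_non_sequential"]

lemma pv_cls1 (l : String) (c1 : PySem.Str.isIn "Float detected in Decimal field" l = true) :
    pvClassify l = some "yaml_float_literals" := by
  simp only [pvClassify, pvRules, List.findSome?_cons, List.findSome?_nil, List.any_cons,
    List.any_nil, Bool.or_false]
  simp_all

lemma pv_cls2 (l : String)
    (c1 : ¬ PySem.Str.isIn "Float detected in Decimal field" l = true)
    (c2 : (PySem.Str.isIn "Document exists but not in index" l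
        || PySem.Str.isIn "Document exists but not in MASTER_INDEX" l) = true) :
    pvClassify l = some "master_index_missing" := by
  rcases Bool.or_eq_true_iff.mp c2 with h | h <;>
    simp only [pvClassify, pvRules, List.findSome?_cons, List.findSome?_nil, List.any_cons,
      List.any_nil, Bool.or_false] <;> simp_all

lemma pv_cls3 (l : String)
    (c1 : ¬ PySem.Str.isIn "Float detected in Decimal field" l = true)
    (c2 : ¬ (PySem.Str.isIn "Document exists but not in index" l
        || PySem.Str.isIn "Document exists but not in MASTER_INDEX" l) = true)
    (c3 : (PySem.Str.isIn "Document in index but does not exist" l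
        || PySem.Str.isIn "does not exist" l) = true) :
    pvClassify l = some "master_index_deleted" := by
  rw [Bool.or_eq_true_iff, not_or] at c2
  rcases Bool.or_eq_true_iff.mp c3 with h | h <;>
    simp only [pvClassify, pvRules, List.findSome?_cons, List.findSome?_nil, List.any_cons,
      List.any_nil, Bool.or_false] <;> simp_all

lemma pv_cls4 (l : String)
    (c1 : ¬ PySem.Str.isIn "Float detected in Decimal field" l = true)
    (c2 : ¬ (PySem.Str.isIn "Document exists but not in index" l
        || PySem.Str.isIn "Document exists but not in MASTER_INDEX" l) = true)
    (c3 : ¬ (PySem.Str.isIn "Document in index but does not exist" l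
        || PySem.Str.isIn "does not exist" l) = true)
    (c4 : (PySem.Str.isIn "Planned document" l
        || PySem.Str.isIn "Status: Planned" l) = true) :
    pvClassify l = some "master_index_planned" := by
  rw [Bool.or_eq_true_iff, not_or] at c2 c3
  rcases Bool.or_eq_true_iff.mp c4 with h | h <;>
    simp only [pvClassify, pvRules, List.findSome?_cons, List.findSome?_nil, List.any_cons,
      List.any_nil, Bool.or_false] <;> simp_all

lemma pv_cls5 (l : String)
    (c1 : ¬ PySem.Str.isIn "Float detected in Decimal field" l = true)
    (c2 : ¬ (PySem.Str.isIn "Document exists but not in index" l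
        || PySem.Str.isIn "Document exists but not in MASTER_INDEX" l) = true)
    (c3 : ¬ (PySem.Str.isIn "Document in index but does not exist" l
        || PySem.Str.isIn "does not exist" l) = true)
    (c4 : ¬ (PySem.Str.isIn "Planned document" l
        || PySem.Str.isIn "Status: Planned" l) = true)
    (c5 : PySem.Str.isIn "ADR gap detected" l = true) :
    pvClassify l = some "adr_non_sequential" := by
  rw [Bool.or_eq_true_iff, not_or] at c2 c3 c4
  simp only [pvClassify, pvRules, List.findSome?_cons, List.findSome?_nil, List.any_cons,
    List.any_nil, Bool.or_false]
  simp_all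

lemma pv_cls0 (l : String)
    (c1 : ¬ PySem.Str.isIn "Float detected in Decimal field" l = true)
    (c2 : ¬ (PySem.Str.isIn "Document exists but not in index" l
        || PySem.Str.isIn "Document exists but not in MASTER_INDEX" l) = true)
    (c3 : ¬ (PySem.Str.isIn "Document in index but does not exist" l
        || PySem.Str.isIn "does not exist" l) = true)
    (c4 : ¬ (PySem.Str.isIn "Planned document" l
        || PySem.Str.isIn "Status: Planned" l) = true)
    (c5 : ¬ PySem.Str.isIn "ADR gap detected" l = true) :
    pvClassify l = none := by
  rw [Bool.or_eq_true_iff, not_or] at c2 c3 c4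
  simp only [pvClassify, pvRules, List.findSome?_cons, List.findSome?_nil, List.any_cons,
    List.any_nil, Bool.or_false]
  simp_all

lemma pv_getD_fold (lines : List String) (d : PySem.Dict String Int) (k : String) :
    (lines.foldl pvStepA d).getD k 0
      = d.getD k 0 + ((lines.countP (fun l => pvClassify l == some k) : Nat) : Int) := by
  induction lines generalizing d with
  | nil => simp
  | cons l rest ih =>
    simp only [List.foldl_cons, List.countP_cons, ih]
    by_cases c1 : PySem.Str.isIn "Float detected in Decimal field" l = true
    · rw [pv_cls1 l c1]
      simp only [pvStepA, c1, if_true, PySem.Dict.getD_modify]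
      by_cases hk : k = "yaml_float_literals"
      · simp [hk] <;> omega
      · simp [hk, Ne.symm hk]
    · by_cases c2 : (PySem.Str.isIn "Document exists but not in index" l
          || PySem.Str.isIn "Document exists but not in MASTER_INDEX" l) = true
      · rw [pv_cls2 l c1 c2]
        simp only [pvStepA, c1, c2, Bool.false_eq_true, if_true, if_false, PySem.Dict.getD_modify]
        by_cases hk : k = "master_index_missing"
        · simp [hk] <;> omega
        · simp [hk, Ne.symm hk]
      · by_cases c3 : (PySem.Str.isIn "Document in index but does not exist" l
            || PySem.Str.isIn "does not exist" l) = true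
        · rw [pv_cls3 l c1 c2 c3]
          simp only [pvStepA, c1, c2, c3, Bool.false_eq_true, if_true, if_false, PySem.Dict.getD_modify]
          by_cases hk : k = "master_index_deleted"
          · simp [hk] <;> omega
          · simp [hk, Ne.symm hk]
        · by_cases c4 : (PySem.Str.isIn "Planned document" l
              || PySem.Str.isIn "Status: Planned" l) = true
          · rw [pv_cls4 l c1 c2 c3 c4]
            simp only [pvStepA, c1, c2, c3, c4, Bool.false_eq_true, if_true, if_false, PySem.Dict.getD_modify]
            by_cases hk : k = "master_index_planned"
            · simp [hk] <;> omega
            · simp [hk, Ne.symm hk]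
          · by_cases c5 : PySem.Str.isIn "ADR gap detected" l = true
            · rw [pv_cls5 l c1 c2 c3 c4 c5]
              simp only [pvStepA, c1, c2, c3, c4, c5, Bool.false_eq_true, if_true, if_false, PySem.Dict.getD_modify]
              by_cases hk : k = "adr_non_sequential"
              · simp [hk] <;> omega
              · simp [hk, Ne.symm hk]
            · rw [pv_cls0 l c1 c2 c3 c4 c5]
              simp only [pvStepA, c1, c2, c3, c4, c5, Bool.false_eq_true, if_false]
              simp

lemma pv_keys_fold (lines : List String) (d : PySem.Dict String Int)
    (h : d.keys = pvKeys5) :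
    (lines.foldl pvStepA d).keys = pvKeys5 := by
  induction lines generalizing d with
  | nil => simpa using h
  | cons l rest ih =>
    rw [List.foldl_cons]
    apply ih
    have hkeep : ∀ (k : String), k ∈ pvKeys5 → (d.modify k (0:Int) (· + 1)).keys = pvKeys5 := by
      intro k hk
      rw [PySem.Dict.keys_modify, PySem.Dict.keys_insert_of_contains, h]
      rw [PySem.Dict.contains_iff_mem_keys, h]; exact hk
    unfold pvStepA
    split_ifs <;> first
      | exact h
      | (apply hkeep; simp [pvKeys5])

-- ===== VERDICT (by name: the statement is the Claim_ definition above) =====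
theorem extract_validate_docs_warnings_spec : Claim_equal_extract_validate_docs_warnings := by
  intro output _
  unfold Spec_extract_validate_docs_warnings extract_validate_docs_warnings
    extract_validate_docs_warnings_alt
  set lines := (PySem.Str.split? output "\n").getD [] with hl
  set d0 : PySem.Dict String Int :=
    ((((PySem.Dict.empty.insert "yaml_float_literals" 0).insert "master_index_missing" 0).insert
        "master_index_deleted" 0).insert "master_index_planned" 0).insert "adr_non_sequential" 0
    with hd0
  have hkeys0 : d0.keys = pvKeys5 := by rw [hd0]; decide
  have hkeys : (lines.foldl pvStepA d0).keys = pvKeys5 := pv_keys_fold lines d0 hkeys0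
  have hnd : (lines.foldl pvStepA d0).keys.Nodup := by rw [hkeys]; decide
  rw [PySem.Dict.items_eq_map_keys _ hnd 0, hkeys]
  have hgd : ∀ k, (lines.foldl pvStepA d0).getD k 0
      = d0.getD k 0 + ((lines.countP (fun l => pvClassify l == some k) : Nat) : Int) :=
    fun k => pv_getD_fold lines d0 k
  simp only [pvKeys5, pvRules, List.map_cons, List.map_nil, hgd]
  norm_num [hd0, PySem.Dict.getD_insert, PySem.Dict.getD_empty]
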